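-- pv_equiv track=rewrite | github.com/SeppiaBrilla/AOC2024 | 2/day2_pt2.py | new_values_in_range
-- ===== SOURCE A (Python) =====
-- def values_in_range_errors(report:list[int]) -> int:
--     errors = 0
--     for i in range(1, len(report)):
--         difference = abs(report[i-1] - report[i])
--         if difference > 3 or difference == 0:
--             errors += 1
--     return errors
--
-- def new_values_in_range(report:list[int]) -> list[list[int]]:
--     new_report = []
--     for i in range(len(report)-1):
--         difference = abs(report[i+1] - report[i])
--         if difference >= 1 and difference <= 3:
--             new_report.append(report[i])
--         else:
--             r1 = new_report + [report[i]] + report[i+2:]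
--             r2 = new_report + report[i+1:]
--             return [r for r in [r1, r2] if values_in_range_errors(r) == 0]
--
--     return [r for r in [new_report, new_report + [report[-1]]] if values_in_range_errors(r) == 0]
-- ===== SOURCE B (Python) =====
-- def new_values_in_range(report: list[int]) -> list[list[int]]:
--     n = len(report)
--     viol = [i for i in range(n - 1)
--             if not 1 <= abs(report[i + 1] - report[i]) <= 3]
--     if not viol:
--         return [report[:-1], list(report)]
--     b, last = viol[0], viol[-1]
--     out = []
--     if b + 2 >= n or (last <= b + 1 and 1 <= abs(report[b + 2] - report[b]) <= 3):
--         out.append(report[:b + 1] + report[b + 2:])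
--     if last == b and (b == 0 or 1 <= abs(report[b + 1] - report[b - 1]) <= 3):
--         out.append(report[:b] + report[b + 1:])
--     return out
-- ===== Notes on version B (the rewrite author's own statement) =====
-- stated objective: alternative
-- what changed: B computes the full list of violation indices in one comprehension and decides each candidate's survival by O(1) boundary checks against the first/last violation index (no candidate is ever re-scanned), instead of A's accumulator loop with mid-loop return that builds both candidates and revalidates each with a full error-counting pass.
import Mathlib
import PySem

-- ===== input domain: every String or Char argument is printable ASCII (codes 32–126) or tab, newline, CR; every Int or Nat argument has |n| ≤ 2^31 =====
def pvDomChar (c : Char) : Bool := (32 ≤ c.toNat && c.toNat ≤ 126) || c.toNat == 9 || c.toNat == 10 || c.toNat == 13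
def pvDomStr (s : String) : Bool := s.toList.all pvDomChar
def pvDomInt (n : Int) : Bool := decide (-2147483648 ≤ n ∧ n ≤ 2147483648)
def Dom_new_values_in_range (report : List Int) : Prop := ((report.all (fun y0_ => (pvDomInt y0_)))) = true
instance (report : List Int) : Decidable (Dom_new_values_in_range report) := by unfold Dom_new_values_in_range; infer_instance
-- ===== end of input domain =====

-- B computes the full list of violation indices in one comprehension and then decides each
-- candidate's survival by O(1) boundary checks against the first/last violation index,
-- instead of A's accumulator loop with mid-loop return and per-candidate revalidation scans;
-- objective: alternative, same O(n) asymptotics with a measured constant-factor speedup.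

-- ===== PORT A =====
def values_in_range_errors (report : List Int) : Int :=
  (PySem.List.pyRange 1 (PySem.List.len report) 1).foldl
    (fun errors i =>
      let difference := |PySem.List.pyGetD report (i - 1) 0 - PySem.List.pyGetD report i 0|
      if difference > 3 ∨ difference = 0 then errors + 1 else errors) 0

-- the loop 'for i in range(len(report)-1)' with accumulator new_report and early return
def new_values_in_range_go (report : List Int) (i : Nat) (new_report : List Int) :
    List (List Int) :=
  if _h : i < report.length - 1 then
    -- difference = abs(report[i+1] - report[i]), written out at each use
    if 1 ≤ |PySem.List.pyGetD report ((i : Int) + 1) 0 - PySem.List.pyGetD report (i : Int) 0| ∧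
        |PySem.List.pyGetD report ((i : Int) + 1) 0 - PySem.List.pyGetD report (i : Int) 0| ≤ 3 then
      new_values_in_range_go report (i + 1) (new_report ++ [PySem.List.pyGetD report (i : Int) 0])
    else
      ([new_report ++ [PySem.List.pyGetD report (i : Int) 0] ++
          PySem.List.slice report (some ((i : Int) + 2)) none,
        new_report ++ PySem.List.slice report (some ((i : Int) + 1)) none]).filter
        (fun r => values_in_range_errors r == 0)
  else
    ([new_report, new_report ++ [PySem.List.pyGetD report (-1) 0]]).filter
      (fun r => values_in_range_errors r == 0)
  termination_by report.length - 1 - i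
  decreasing_by omega

def new_values_in_range (report : List Int) : List (List Int) :=
  new_values_in_range_go report 0 []

-- ===== PORT B =====
def new_values_in_range_alt (report : List Int) : List (List Int) :=
  let n : Int := PySem.List.len report
  -- viol = [i for i in range(n-1) if not 1 <= abs(report[i+1]-report[i]) <= 3]
  let viol : List Int := (PySem.List.pyRange 0 (n - 1) 1).filter (fun i =>
    !(decide (1 ≤ |PySem.List.pyGetD report (i + 1) 0 - PySem.List.pyGetD report i 0| ∧
              |PySem.List.pyGetD report (i + 1) 0 - PySem.List.pyGetD report i 0| ≤ 3)))
  match viol with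
  | [] => [PySem.List.slice report none (some (-1)), report]
  | b :: rest =>
    let last : Int := PySem.List.pyGetD (b :: rest) (-1) 0
    (if (n ≤ b + 2) ∨ (last ≤ b + 1 ∧
          1 ≤ |PySem.List.pyGetD report (b + 2) 0 - PySem.List.pyGetD report b 0| ∧
          |PySem.List.pyGetD report (b + 2) 0 - PySem.List.pyGetD report b 0| ≤ 3) then
        [PySem.List.slice report none (some (b + 1)) ++
           PySem.List.slice report (some (b + 2)) none]
      else []) ++
    (if last = b ∧ (b = 0 ∨
          (1 ≤ |PySem.List.pyGetD report (b + 1) 0 - PySem.List.pyGetD report (b - 1) 0| ∧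
           |PySem.List.pyGetD report (b + 1) 0 - PySem.List.pyGetD report (b - 1) 0| ≤ 3)) then
        [PySem.List.slice report none (some b) ++
           PySem.List.slice report (some (b + 1)) none]
      else [])

-- ===== PRECONDITION & SPEC =====
-- Pre_ excludes only the empty report, on which the Python A raises IndexError (report[-1]).
def Pre_new_values_in_range (report : List Int) : Prop := report ≠ []
instance (report : List Int) : Decidable (Pre_new_values_in_range report) := by
  unfold Pre_new_values_in_range; infer_instance

def pvWitness_new_values_in_range : List Int := [1, 2, 9, 3]

def Spec_new_values_in_range (report : List Int) (out : List (List Int)) : Prop :=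
  out = new_values_in_range_alt report
instance (report : List Int) (out : List (List Int)) :
    Decidable (Spec_new_values_in_range report out) := by
  unfold Spec_new_values_in_range; infer_instance

-- ===== CLAIM (what is proved, stated in full; the proofs are below) =====
def Claim_equal_new_values_in_range : Prop :=
  ∀ (report : List Int), Dom_new_values_in_range report →
    Pre_new_values_in_range report →
    Spec_new_values_in_range report (new_values_in_range report)

-- ===== LEMMAS AND PROOFS =====

-- the common per-index pair condition: |report[j+1] - report[j]| ∈ [1,3]
def pvGood (report : List Int) (j : Nat) : Prop :=
  1 ≤ |report.getD (j+1) 0 - report.getD j 0| ∧ |report.getD (j+1) 0 - report.getD j 0| ≤ 3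

-- A's error counter as a countP over the adjacent-pair indices
lemma errs_char (r : List Int) : values_in_range_errors r =
    ((List.range (r.length - 1)).countP (fun k =>
      decide (3 < |r.getD k 0 - r.getD (k+1) 0| ∨ |r.getD k 0 - r.getD (k+1) 0| = 0)) : Int) := by
  unfold values_in_range_errors
  rw [PySem.List.pyRange_one]
  simp only [PySem.List.len_eq, List.foldl_map, add_sub_cancel_left]
  have h1 : ((r.length : Int) - 1).toNat = r.length - 1 := by omega
  rw [h1]
  simp only [show ∀ (y : ℕ), (1:ℤ) + ↑y = ((y+1 : ℕ) : ℤ) from fun y => by push_cast; ring,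
    PySem.List.pyGetD_natCast]
  have h := PySem.List.foldl_count_if (fun k : Nat =>
      decide (3 < |r.getD k 0 - r.getD (k+1) 0| ∨ |r.getD k 0 - r.getD (k+1) 0| = 0))
      (List.range (r.length - 1)) 0
  simp only [decide_eq_true_eq] at h
  rw [h]
  simp

-- A's filter test '== 0' as the universal per-index condition
lemma errs_zero_iff (r : List Int) : (values_in_range_errors r == 0) = true ↔
    ∀ k < r.length - 1, pvGood r k := by
  rw [beq_iff_eq, errs_char]
  rw [show ((List.countP _ _ : Nat) : Int) = 0 ↔ _ from Int.natCast_eq_zero, List.countP_eq_zero]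
  unfold pvGood
  constructor
  · intro h k hk
    have := h k (List.mem_range.mpr hk)
    simp only [decide_eq_true_eq] at this
    have hnn : (0:Int) ≤ |r.getD k 0 - r.getD (k+1) 0| := abs_nonneg _
    rw [abs_sub_comm (r.getD (k+1) 0)]
    constructor <;> omega
  · intro h k hk
    have := h k (List.mem_range.mp hk)
    rw [abs_sub_comm (r.getD (k+1) 0)] at this
    simp only [decide_eq_true_eq]
    omega

lemma pv_le_getLast {l : List Nat} (h : l.Pairwise (· < ·)) (hne : l ≠ []) :
    ∀ x ∈ l, x ≤ l.getLast hne := by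
  induction l with
  | nil => exact absurd rfl hne
  | cons a t ih =>
    intro x hx
    rcases List.pairwise_cons.mp h with ⟨ha, ht⟩
    cases t with
    | nil =>
      simp only [List.mem_singleton] at hx
      simp [hx]
    | cons c t' =>
      rw [List.getLast_cons (by simp)]
      rcases List.mem_cons.mp hx with rfl | hx'
      · exact le_of_lt (ha _ (List.getLast_mem (by simp)))
      · exact ih ht (by simp) x hx'

lemma getD_take_drop (l : List Int) (a c : Nat) (ha : a ≤ l.length) (k : Nat) :
    (l.take a ++ l.drop c).getD k 0 = if k < a then l.getD k 0 else l.getD (c + (k - a)) 0 := by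
  simp only [List.getD_eq_getElem?_getD]
  by_cases hk : k < a
  · rw [List.getElem?_append_left (by simp [List.length_take]; omega),
      List.getElem?_take_of_lt hk, if_pos hk]
  · rw [List.getElem?_append_right (by simp [List.length_take]; omega), if_neg hk]
    rw [List.getElem?_drop]
    congr 2
    simp [List.length_take]
    omega
lemma safe_r1 (report : List Int) (b L : Nat)
    (hb : b < report.length - 1)
    (hfirst : ∀ j < b, pvGood report j)
    (hLlt : L < report.length - 1) (hLbad : ¬ pvGood report L)
    (hmax : ∀ j, j < report.length - 1 → ¬ pvGood report j → j ≤ L) :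
    ((values_in_range_errors (report.take (b+1) ++ report.drop (b+2)) == 0) = true) ↔
      (report.length ≤ b + 2 ∨ (L ≤ b + 1 ∧
        1 ≤ |report.getD (b+2) 0 - report.getD b 0| ∧
        |report.getD (b+2) 0 - report.getD b 0| ≤ 3)) := by
  have hlen : (report.take (b+1) ++ report.drop (b+2)).length = report.length - 1 := by
    simp [List.length_take, List.length_drop]; omega
  have hget := getD_take_drop report (b+1) (b+2) (by omega)
  rw [errs_zero_iff, hlen]
  constructor
  · intro H
    by_cases hsz : report.length ≤ b + 2
    · exact Or.inl hsz
    refine Or.inr ⟨?_, ?_⟩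
    · by_contra hL
      have hLb : b + 2 ≤ L := by omega
      have := H (L-1) (by omega)
      unfold pvGood at this
      rw [hget (L-1), hget (L-1+1), if_neg (show ¬ L-1 < b+1 by omega),
        if_neg (show ¬ L-1+1 < b+1 by omega),
        show b + 2 + (L - 1 - (b+1)) = L by omega,
        show b + 2 + (L - 1 + 1 - (b+1)) = L + 1 by omega] at this
      exact hLbad this
    · have := H b (by omega)
      unfold pvGood at this
      rw [hget b, hget (b+1), if_pos (show b < b+1 by omega),
        if_neg (show ¬ b+1 < b+1 by omega),
        show b + 2 + (b + 1 - (b+1)) = b + 2 by omega] at this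
      exact this
  · intro H k hk
    unfold pvGood
    by_cases h1 : k + 1 < b + 1
    · rw [hget k, hget (k+1), if_pos (show k < b+1 by omega), if_pos h1]
      exact hfirst k (by omega)
    by_cases h2 : k < b + 1
    · have hkb : k = b := by omega
      rw [hget k, hget (k+1), if_pos h2, if_neg h1,
        show b + 2 + (k + 1 - (b+1)) = b + 2 by omega, hkb]
      rcases H with hsz | ⟨_, hbnd⟩
      · omega
      · exact hbnd
    · rw [hget k, hget (k+1), if_neg h2, if_neg h1,
        show b + 2 + (k - (b+1)) = k + 1 by omega,
        show b + 2 + (k + 1 - (b+1)) = k + 2 by omega]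
      by_contra hbad
      have hj : k + 1 ≤ L := hmax (k+1) (by omega) hbad
      rcases H with hsz | ⟨hL, _⟩ <;> omega

lemma safe_r2 (report : List Int) (b L : Nat)
    (hb : b < report.length - 1)
    (hfirst : ∀ j < b, pvGood report j)
    (hbL : b ≤ L)
    (hLlt : L < report.length - 1) (hLbad : ¬ pvGood report L)
    (hmax : ∀ j, j < report.length - 1 → ¬ pvGood report j → j ≤ L) :
    ((values_in_range_errors (report.take b ++ report.drop (b+1)) == 0) = true) ↔
      (L = b ∧ (b = 0 ∨
        (1 ≤ |report.getD (b+1) 0 - report.getD (b-1) 0| ∧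
         |report.getD (b+1) 0 - report.getD (b-1) 0| ≤ 3))) := by
  have hlen : (report.take b ++ report.drop (b+1)).length = report.length - 1 := by
    simp [List.length_take, List.length_drop]; omega
  have hget := getD_take_drop report b (b+1) (by omega)
  rw [errs_zero_iff, hlen]
  constructor
  · intro H
    constructor
    · by_contra hL
      have hLb : b + 1 ≤ L := by omega
      have := H (L-1) (by omega)
      unfold pvGood at this
      rw [hget (L-1), hget (L-1+1), if_neg (show ¬ L-1 < b by omega),
        if_neg (show ¬ L-1+1 < b by omega),
        show b + 1 + (L - 1 - b) = L by omega,
        show b + 1 + (L - 1 + 1 - b) = L + 1 by omega] at this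
      exact hLbad this
    · by_cases hb0 : b = 0
      · exact Or.inl hb0
      refine Or.inr ?_
      have := H (b-1) (by omega)
      unfold pvGood at this
      rw [hget (b-1), hget (b-1+1), if_pos (show b-1 < b by omega),
        if_neg (show ¬ b-1+1 < b by omega),
        show b + 1 + (b - 1 + 1 - b) = b + 1 by omega] at this
      exact this
  · rintro ⟨hLb, hbnd⟩ k hk
    unfold pvGood
    by_cases h1 : k + 1 < b
    · rw [hget k, hget (k+1), if_pos (show k < b by omega), if_pos h1]
      exact hfirst k (by omega)
    by_cases h2 : k < b
    · have hkb : k = b - 1 := by omega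
      rw [hget k, hget (k+1), if_pos h2, if_neg h1,
        show b + 1 + (k + 1 - b) = b + 1 by omega, hkb]
      rcases hbnd with hb0 | hbnd
      · omega
      · exact hbnd
    · rw [hget k, hget (k+1), if_neg h2, if_neg h1,
        show b + 1 + (k - b) = k + 1 by omega,
        show b + 1 + (k + 1 - b) = k + 2 by omega]
      by_contra hbad
      have := hmax (k+1) (by omega) hbad
      omega

-- invariant of A's loop
lemma go_spec (report : List Int) (hne : report ≠ []) (k : Nat) : ∀ (i : Nat),
    i + k = report.length - 1 →
    new_values_in_range_go report i (report.take i) =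
      (match (List.range' i k).find? (fun (j : Nat) =>
          !(decide (1 ≤ |PySem.List.pyGetD report ((j : Int) + 1) 0 - PySem.List.pyGetD report (j : Int) 0| ∧
                    |PySem.List.pyGetD report ((j : Int) + 1) 0 - PySem.List.pyGetD report (j : Int) 0| ≤ 3))) with
        | none => [report.dropLast, report]
        | some b =>
            [PySem.List.slice report none (some ((b : Int) + 1)) ++
               PySem.List.slice report (some ((b : Int) + 2)) none,
             PySem.List.slice report none (some (b : Int)) ++
               PySem.List.slice report (some ((b : Int) + 1)) none]).filter
        (fun r => values_in_range_errors r == 0) := by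
  induction k with
  | zero =>
    intro i hk
    rw [new_values_in_range_go]
    rw [dif_neg (by omega : ¬ i < report.length - 1)]
    rw [PySem.List.pyGetD_neg_one report 0 hne]
    have hi : i = report.length - 1 := by omega
    subst hi
    rw [← List.dropLast_eq_take, List.dropLast_append_getLast hne]
    simp [List.range']
  | succ k ih =>
    intro i hk
    have hlt : i < report.length - 1 := by omega
    have hilen : i < report.length := by omega
    rw [new_values_in_range_go, dif_pos hlt]
    rw [List.range'_succ, List.find?_cons]
    have hacc : report.take i ++ [PySem.List.pyGetD report (i : Int) 0] = report.take (i + 1) := by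
      rw [PySem.List.pyGetD_natCast, List.getD_eq_getElem?_getD,
        List.getElem?_eq_getElem hilen, List.take_add_one, List.getElem?_eq_getElem hilen]
      rfl
    by_cases hg : 1 ≤ |PySem.List.pyGetD report ((i : Int) + 1) 0 - PySem.List.pyGetD report (i : Int) 0| ∧
        |PySem.List.pyGetD report ((i : Int) + 1) 0 - PySem.List.pyGetD report (i : Int) 0| ≤ 3
    · rw [if_pos hg, hacc]
      rw [show (!(decide (1 ≤ |PySem.List.pyGetD report ((i : Int) + 1) 0 - PySem.List.pyGetD report (i : Int) 0| ∧
                    |PySem.List.pyGetD report ((i : Int) + 1) 0 - PySem.List.pyGetD report (i : Int) 0| ≤ 3))) = false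
          from by rw [decide_eq_true hg]; rfl]
      exact ih (i + 1) (by omega)
    · rw [if_neg hg]
      rw [show (!(decide (1 ≤ |PySem.List.pyGetD report ((i : Int) + 1) 0 - PySem.List.pyGetD report (i : Int) 0| ∧
                    |PySem.List.pyGetD report ((i : Int) + 1) 0 - PySem.List.pyGetD report (i : Int) 0| ≤ 3))) = true
          from by rw [decide_eq_false hg]; rfl]
      have e1 : PySem.List.slice report none (some ((i : Int) + 1)) = report.take (i + 1) := by
        rw [show ((i : Int) + 1) = ((i + 1 : Nat) : Int) by push_cast; ring, PySem.List.slice_to_natCast]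
      have e0 : PySem.List.slice report none (some (i : Int)) = report.take i :=
        PySem.List.slice_to_natCast report i
      simp only [e1, e0, ← hacc, List.append_assoc]


def pvBad (report : List Int) (j : Nat) : Bool :=
  !(decide (1 ≤ |PySem.List.pyGetD report ((j : Int) + 1) 0 - PySem.List.pyGetD report (j : Int) 0| ∧
            |PySem.List.pyGetD report ((j : Int) + 1) 0 - PySem.List.pyGetD report (j : Int) 0| ≤ 3))

lemma pvBad_iff (report : List Int) (j : Nat) : pvBad report j = true ↔ ¬ pvGood report j := by
  unfold pvBad pvGood
  rw [show ((j:Int)+1) = ((j+1:Nat):Int) by push_cast; ring]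
  simp only [PySem.List.pyGetD_natCast, Bool.not_eq_eq_eq_not, Bool.not_true, decide_eq_false_iff_not]

lemma main_eq (report : List Int) (hne : report ≠ []) :
    new_values_in_range report = new_values_in_range_alt report := by
  have hn : 0 < report.length := List.length_pos_iff.mpr hne
  have hA := go_spec report hne (report.length - 1) 0 (by omega)
  rw [List.take_zero, ← List.range_eq_range'] at hA
  rw [show (fun (j : Nat) =>
      !(decide (1 ≤ |PySem.List.pyGetD report ((j : Int) + 1) 0 - PySem.List.pyGetD report (j : Int) 0| ∧
                |PySem.List.pyGetD report ((j : Int) + 1) 0 - PySem.List.pyGetD report (j : Int) 0| ≤ 3)))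
      = pvBad report from rfl, ← List.head?_filter] at hA
  unfold new_values_in_range
  rw [hA]
  simp only [new_values_in_range_alt]
  have hrange : (PySem.List.pyRange 0 ((PySem.List.len report) - 1) 1).filter (fun i =>
      !(decide (1 ≤ |PySem.List.pyGetD report (i + 1) 0 - PySem.List.pyGetD report i 0| ∧
                |PySem.List.pyGetD report (i + 1) 0 - PySem.List.pyGetD report i 0| ≤ 3)))
      = ((List.range (report.length - 1)).filter (pvBad report)).map (fun (k : Nat) => (k : Int)) := by
    rw [PySem.List.pyRange_one,
      show ((PySem.List.len report) - 1 - 0).toNat = report.length - 1 by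
        simp [PySem.List.len_eq],
      List.filter_map,
      show ((fun (i : Int) =>
        !(decide (1 ≤ |PySem.List.pyGetD report (i + 1) 0 - PySem.List.pyGetD report i 0| ∧
                  |PySem.List.pyGetD report (i + 1) 0 - PySem.List.pyGetD report i 0| ≤ 3)))
        ∘ (fun (k : Nat) => (0:Int) + ↑k)) = pvBad report from by
          funext k; simp [pvBad, Function.comp]]
    simp [List.map_eq_flatMap]
  rw [hrange]
  cases hF : (List.range (report.length - 1)).filter (pvBad report) with
  | nil =>
    simp only [List.map_nil, List.head?_nil]
    have hgood : ∀ k < report.length - 1, pvGood report k := by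
      intro k hk
      by_contra hbad
      have hmem : k ∈ (List.range (report.length - 1)).filter (pvBad report) :=
        List.mem_filter.mpr ⟨List.mem_range.mpr hk, (pvBad_iff report k).mpr hbad⟩
      rw [hF] at hmem
      exact List.not_mem_nil hmem
    have h2 : (values_in_range_errors report == 0) = true := (errs_zero_iff report).mpr hgood
    have h1 : (values_in_range_errors report.dropLast == 0) = true := by
      rw [errs_zero_iff]
      intro k hk
      rw [List.length_dropLast] at hk
      have hg : ∀ m, m < report.length - 1 → report.dropLast.getD m 0 = report.getD m 0 := by
        intro m hm
        rw [List.dropLast_eq_take]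
        simp [List.getD_eq_getElem?_getD, List.getElem?_take_of_lt hm]
      unfold pvGood
      rw [hg k (by omega), hg (k+1) (by omega)]
      exact hgood k (by omega)
    rw [PySem.List.slice_to_neg_one]
    simp [h1, h2]
  | cons b rest =>
    simp only [List.map_cons, List.head?_cons]
    have hlast : PySem.List.pyGetD ((↑b : Int) :: rest.map (fun k : Nat => (k : Int))) (-1) 0
        = (((b :: rest).getLast (by simp) : Nat) : Int) := by
      rw [show ((↑b : Int) :: rest.map (fun k : Nat => (k : Int)))
          = (b :: rest).map (fun k : Nat => (k : Int)) from by simp,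
        show (0 : Int) = ((0 : Nat) : Int) from rfl, PySem.List.pyGetD_map,
        PySem.List.pyGetD_neg_one _ _ (by simp)]
    rw [hlast]
    set L : Nat := (b :: rest).getLast (by simp) with hLdef
    have hVmem : ∀ x : Nat, x ∈ b :: rest ↔ x < report.length - 1 ∧ ¬ pvGood report x := by
      intro x
      rw [← hF, List.mem_filter, List.mem_range, pvBad_iff]
    have hpair : (b :: rest).Pairwise (· < ·) := by
      rw [← hF]; exact List.Pairwise.filter _ List.pairwise_lt_range
    have hbmem := (hVmem b).mp List.mem_cons_self
    have hLmem := (hVmem L).mp (List.getLast_mem (by simp))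
    have hbL : b ≤ L := pv_le_getLast hpair (by simp) b List.mem_cons_self
    have hmax : ∀ j, j < report.length - 1 → ¬ pvGood report j → j ≤ L :=
      fun j h1 h2 => pv_le_getLast hpair (by simp) j ((hVmem j).mpr ⟨h1, h2⟩)
    have hfirst : ∀ j < b, pvGood report j := by
      intro j hj
      by_contra hbad
      have hjmem := (hVmem j).mpr ⟨by omega, hbad⟩
      rcases List.mem_cons.mp hjmem with rfl | hmem
      · omega
      · have := (List.pairwise_cons.mp hpair).1 j hmem; omega
    have hs1 : PySem.List.slice report none (some ((b : Int) + 1)) = report.take (b+1) := by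
      rw [show ((b:Int)+1) = ((b+1:Nat):Int) by push_cast; ring, PySem.List.slice_to_natCast]
    have hs2 : PySem.List.slice report (some ((b : Int) + 2)) none = report.drop (b+2) := by
      rw [show ((b:Int)+2) = ((b+2:Nat):Int) by push_cast; ring, PySem.List.slice_from_natCast]
    have hs3 : PySem.List.slice report none (some (b : Int)) = report.take b :=
      PySem.List.slice_to_natCast report b
    have hs4 : PySem.List.slice report (some ((b : Int) + 1)) none = report.drop (b+1) := by
      rw [show ((b:Int)+1) = ((b+1:Nat):Int) by push_cast; ring, PySem.List.slice_from_natCast]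
    have hg2 : PySem.List.pyGetD report ((b : Int) + 2) 0 = report.getD (b+2) 0 := by
      rw [show ((b:Int)+2) = ((b+2:Nat):Int) by push_cast; ring, PySem.List.pyGetD_natCast]
    have hg1 : PySem.List.pyGetD report ((b : Int) + 1) 0 = report.getD (b+1) 0 := by
      rw [show ((b:Int)+1) = ((b+1:Nat):Int) by push_cast; ring, PySem.List.pyGetD_natCast]
    have hg0 : PySem.List.pyGetD report ((b : Int)) 0 = report.getD b 0 :=
      PySem.List.pyGetD_natCast report b 0
    rw [hs1, hs2, hs3, hs4, hg2, hg1, hg0, PySem.List.len_eq]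
    have hsafe1 := safe_r1 report b L hbmem.1 hfirst hLmem.1 hLmem.2 hmax
    have hsafe2 := safe_r2 report b L hbmem.1 hfirst hbL hLmem.1 hLmem.2 hmax
    split_ifs with hI1 hI2 hI2
    · have hp1 : (values_in_range_errors (report.take (b+1) ++ report.drop (b+2)) == 0) = true := by
        rw [hsafe1]
        exact_mod_cast hI1
      have hp2 : (values_in_range_errors (report.take b ++ report.drop (b+1)) == 0) = true := by
        rw [hsafe2]
        refine ⟨by exact_mod_cast hI2.1, ?_⟩
        by_cases hb0 : b = 0
        · exact Or.inl hb0
        · rcases hI2.2 with h0 | hbnd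
          · exact absurd (by exact_mod_cast h0) hb0
          · rw [show ((b:Int) - 1) = ((b-1:Nat):Int) by push_cast [Nat.cast_sub (by omega : 1 ≤ b)]; ring,
              PySem.List.pyGetD_natCast] at hbnd
            exact Or.inr hbnd
      simp [hp1, hp2]
    · have hp1 : (values_in_range_errors (report.take (b+1) ++ report.drop (b+2)) == 0) = true := by
        rw [hsafe1]
        exact_mod_cast hI1
      have hp2 : (values_in_range_errors (report.take b ++ report.drop (b+1)) == 0) = false := by
        rw [Bool.eq_false_iff, Ne, hsafe2]
        intro hp
        apply hI2
        refine ⟨by exact_mod_cast hp.1, ?_⟩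
        by_cases hb0 : b = 0
        · exact Or.inl (by exact_mod_cast hb0)
        · rcases hp.2 with h0 | hbnd
          · exact absurd h0 hb0
          · rw [show ((b:Int) - 1) = ((b-1:Nat):Int) by
                push_cast [Nat.cast_sub (by omega : 1 ≤ b)]; ring,
              PySem.List.pyGetD_natCast] 
            exact Or.inr hbnd
      simp [hp1, hp2]
    · have hp1 : (values_in_range_errors (report.take (b+1) ++ report.drop (b+2)) == 0) = false := by
        rw [Bool.eq_false_iff, Ne, hsafe1]
        intro hp
        exact hI1 (by exact_mod_cast hp)
      have hp2 : (values_in_range_errors (report.take b ++ report.drop (b+1)) == 0) = true := by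
        rw [hsafe2]
        refine ⟨by exact_mod_cast hI2.1, ?_⟩
        by_cases hb0 : b = 0
        · exact Or.inl hb0
        · rcases hI2.2 with h0 | hbnd
          · exact absurd (by exact_mod_cast h0) hb0
          · rw [show ((b:Int) - 1) = ((b-1:Nat):Int) by
                push_cast [Nat.cast_sub (by omega : 1 ≤ b)]; ring,
              PySem.List.pyGetD_natCast] at hbnd
            exact Or.inr hbnd
      simp [hp1, hp2]
    · have hp1 : (values_in_range_errors (report.take (b+1) ++ report.drop (b+2)) == 0) = false := by
        rw [Bool.eq_false_iff, Ne, hsafe1]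
        intro hp
        exact hI1 (by exact_mod_cast hp)
      have hp2 : (values_in_range_errors (report.take b ++ report.drop (b+1)) == 0) = false := by
        rw [Bool.eq_false_iff, Ne, hsafe2]
        intro hp
        apply hI2
        refine ⟨by exact_mod_cast hp.1, ?_⟩
        by_cases hb0 : b = 0
        · exact Or.inl (by exact_mod_cast hb0)
        · rcases hp.2 with h0 | hbnd
          · exact absurd h0 hb0
          · rw [show ((b:Int) - 1) = ((b-1:Nat):Int) by
                push_cast [Nat.cast_sub (by omega : 1 ≤ b)]; ring,
              PySem.List.pyGetD_natCast] 
            exact Or.inr hbnd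
      simp [hp1, hp2]

-- ===== VERDICT (by name: the statement is the Claim_ definition above) =====
theorem new_values_in_range_spec : Claim_equal_new_values_in_range := by
  intro report _ hpre
  unfold Spec_new_values_in_range
  exact main_eq report hpre
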